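-- pv_equiv track=rewrite | github.com/SestrenExsis/CodeKatas | adventofcode/AdventOfCode2021.py | find_valid_y_vels
-- ===== SOURCE A (Python) =====
-- def find_valid_y_vels(lower_bound: int, upper_bound: int) -> set:
--     valid_y_vels = set()
--     for initial_y_vel in range(upper_bound + 1, -1, -1):
--         valid_ind = False
--         y = 0
--         y_vel = initial_y_vel
--         while y_vel > 0:
--             y += y_vel
--             y_vel -= 1
--             if lower_bound <= y <= upper_bound:
--                 valid_ind = True
--                 break
--         if valid_ind:
--             valid_y_vels.add(y_vel)
--     result = valid_y_vels
--     return result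
-- ===== SOURCE B (Python) =====
-- def find_valid_y_vels(lower_bound: int, upper_bound: int) -> set:
--     # Per initial velocity, positions k*v - k*(k-1)//2 are increasing while the
--     # velocity stays positive, so binary-search the first step at or past the
--     # lower bound instead of simulating the arc step by step.
--     valid_y_vels = set()
--     for v in range(upper_bound + 1, 0, -1):
--         if v * (v + 1) // 2 < lower_bound:
--             continue  # even the apex never reaches the range
--         lo = 1
--         hi = v
--         while lo < hi:
--             mid = (lo + hi) // 2
--             if mid * v - mid * (mid - 1) // 2 >= lower_bound:
--                 hi = mid
--             else:
--                 lo = mid + 1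
--         if lo * v - lo * (lo - 1) // 2 <= upper_bound:
--             valid_y_vels.add(v - lo)
--     return valid_y_vels
-- ===== Notes on version B (the rewrite author's own statement) =====
-- stated objective: alternative
-- what changed: Instead of simulating each projectile arc step by step, B uses that the positions k*v - k*(k-1)//2 are increasing while the velocity is positive and binary-searches, per initial velocity, the first step at or past the lower bound; intended as faster on hard ranges (the probe measured A 2487ms vs B 23ms at n=4096, with one A timeout), but B is slower when the very first step already reaches the range, so no unqualified speed claim.
import Mathlib
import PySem

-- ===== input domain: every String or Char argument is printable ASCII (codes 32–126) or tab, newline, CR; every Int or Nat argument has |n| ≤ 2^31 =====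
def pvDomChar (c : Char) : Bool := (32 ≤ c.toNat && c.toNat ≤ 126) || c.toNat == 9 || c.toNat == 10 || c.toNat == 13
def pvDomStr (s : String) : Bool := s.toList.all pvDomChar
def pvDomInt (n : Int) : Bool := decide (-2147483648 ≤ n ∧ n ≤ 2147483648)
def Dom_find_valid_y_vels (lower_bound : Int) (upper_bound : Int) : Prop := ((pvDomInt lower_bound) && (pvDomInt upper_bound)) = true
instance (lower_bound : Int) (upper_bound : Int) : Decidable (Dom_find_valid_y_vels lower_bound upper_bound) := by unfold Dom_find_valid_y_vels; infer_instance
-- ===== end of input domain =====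

-- B replaces A's step-by-step simulation of each arc by a per-velocity binary
-- search for the first step at or past the lower bound (positions are monotone
-- while the velocity is positive); objective: alternative (intended as faster
-- on hard ranges; a timing run did not confirm an across-the-board speedup).

-- ===== PORT A =====
-- inner 'while y_vel > 0' loop of A: returns the final y_vel if it broke with
-- lower <= y <= upper, none if the loop ran out
def pvWhileA (lower upper y y_vel : Int) : Option Int :=
  if _h : 0 < y_vel then
    let y' := y + y_vel
    let v' := y_vel - 1
    if lower ≤ y' ∧ y' ≤ upper then some v'
    else pvWhileA lower upper y' v'
  else none
termination_by y_vel.toNat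
decreasing_by omega

def find_valid_y_vels (lower_bound : Int) (upper_bound : Int) : List Int :=
  (PySem.List.pyRange (upper_bound + 1) (-1) (-1)).foldl
    (fun s initial_y_vel =>
      match pvWhileA lower_bound upper_bound 0 initial_y_vel with
      | some w => PySem.Set.add s w
      | none => s)
    (PySem.Set.empty : PySem.Set Int)

-- ===== PORT B =====
-- position after k steps with initial velocity v (Source B's closed form)
def pvF (v k : Int) : Int := k * v - PySem.Int.floordiv (k * (k - 1)) 2

-- Source B's 'while lo < hi' bisection
def pvBisect (lower v lo hi : Int) : Int :=
  if _h : lo < hi then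
    let mid := PySem.Int.floordiv (lo + hi) 2
    if lower ≤ pvF v mid then pvBisect lower v lo mid
    else pvBisect lower v (mid + 1) hi
  else lo
termination_by (hi - lo).toNat
decreasing_by
  · have h1 := (PySem.Int.floordiv_lt_iff_lt_mul (a := lo + hi) (b := 2) (q := hi) (by omega)).mpr (by omega)
    omega
  · have h2 := (PySem.Int.le_floordiv_iff_mul_le (a := lo + hi) (b := 2) (q := lo) (by omega)).mpr (by omega)
    omega

def find_valid_y_vels_alt (lower_bound : Int) (upper_bound : Int) : List Int :=
  (PySem.List.pyRange (upper_bound + 1) 0 (-1)).foldl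
    (fun s v =>
      if PySem.Int.floordiv (v * (v + 1)) 2 < lower_bound then s
      else
        let lo := pvBisect lower_bound v 1 v
        if pvF v lo ≤ upper_bound then PySem.Set.add s (v - lo) else s)
    (PySem.Set.empty : PySem.Set Int)

-- ===== PRECONDITION & SPEC =====
def Spec_find_valid_y_vels (lower_bound : Int) (upper_bound : Int) (out : List Int) : Prop := out = find_valid_y_vels_alt lower_bound upper_bound
instance (lower_bound : Int) (upper_bound : Int) (out : List Int) : Decidable (Spec_find_valid_y_vels lower_bound upper_bound out) := by unfold Spec_find_valid_y_vels; infer_instance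

-- ===== CLAIM (what is proved, stated in full; the proofs are below) =====
def Claim_equal_find_valid_y_vels : Prop := ∀ (lower_bound : Int) (upper_bound : Int), Dom_find_valid_y_vels lower_bound upper_bound → Spec_find_valid_y_vels lower_bound upper_bound (find_valid_y_vels lower_bound upper_bound)

-- ===== LEMMAS AND PROOFS =====

-- exact halving
theorem pv_fd2 (m : Int) : PySem.Int.floordiv (2 * m) 2 = m := by
  rw [PySem.Int.floordiv_eq_ediv_of_pos (by norm_num)]
  exact Int.mul_ediv_cancel_left m (by norm_num)

-- recurrence of the closed-form position
theorem pvF_succ (v k : Int) : pvF v (k + 1) = pvF v k + (v - k) := by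
  obtain ⟨m, hm⟩ := Int.even_mul_succ_self (k - 1)
  unfold pvF
  have h1 : (k + 1) * (k + 1 - 1) = 2 * (m + k) := by linear_combination hm
  have h2 : k * (k - 1) = 2 * m := by linear_combination hm
  rw [h1, h2, pv_fd2, pv_fd2]
  ring

theorem pvF_zero (v : Int) : pvF v 0 = 0 := by
  have h : (0 : Int) * (0 - 1) = 2 * 0 := by ring
  unfold pvF
  rw [h, pv_fd2]
  ring

theorem pvF_last (v : Int) : pvF v v = PySem.Int.floordiv (v * (v + 1)) 2 := by
  obtain ⟨m, hm⟩ := Int.even_mul_succ_self (v - 1)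
  unfold pvF
  have h1 : v * (v - 1) = 2 * m := by linear_combination hm
  have h2 : v * (v + 1) = 2 * (m + v) := by linear_combination hm
  rw [h1, h2, pv_fd2, pv_fd2]
  have h3 : v * v = 2 * m + v := by linear_combination hm
  omega

-- monotonicity of positions up to step v
theorem pvF_mono_aux (v : Int) : ∀ (n : Nat) (j : Int), j + n ≤ v → pvF v j ≤ pvF v (j + n) := by
  intro n
  induction n with
  | zero => intro j _; simp
  | succ n ih =>
    intro j hj
    have h1 : pvF v j ≤ pvF v (j + n) := ih j (by omega)
    have h2 : pvF v (j + n + 1) = pvF v (j + n) + (v - (j + n)) := pvF_succ v (j + n)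
    have h3 : (j + (n + 1 : Nat) : Int) = j + n + 1 := by push_cast; ring
    rw [h3, h2]
    omega

theorem pvF_mono (v j k : Int) (hjk : j ≤ k) (hk : k ≤ v) : pvF v j ≤ pvF v k := by
  have h := pvF_mono_aux v (k - j).toNat j (by omega)
  have h2 : (j + ((k - j).toNat : Int)) = k := by omega
  rwa [h2] at h

-- A's while loop is the linear scan for the first in-range step
theorem pvWhileA_scan_aux (lower upper v : Int) :
    ∀ (n : Nat) (a : Int), 1 ≤ a → a + n = v + 1 →
    pvWhileA lower upper (pvF v (a - 1)) (v - (a - 1)) =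
      Option.map (fun k => v - k)
        ((PySem.List.pyRange a (v + 1) 1).find?
          (fun k => decide (lower ≤ pvF v k ∧ pvF v k ≤ upper))) := by
  intro n
  induction n with
  | zero =>
    intro a _ ha
    have hva : a = v + 1 := by omega
    rw [PySem.List.pyRange_one_eq_nil (by omega), pvWhileA]
    rw [dif_neg (by omega)]
    simp
  | succ n ih =>
    intro a ha1 ha2
    have hav : a ≤ v := by omega
    have hy : pvF v (a - 1) + (v - (a - 1)) = pvF v a := by
      have h := pvF_succ v (a - 1)
      have h2 : a - 1 + 1 = a := by omega
      rw [h2] at h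
      omega
    rw [PySem.List.pyRange_one_cons (by omega), pvWhileA, dif_pos (by omega : 0 < v - (a - 1))]
    simp only [List.find?_cons]
    by_cases hhit : lower ≤ pvF v a ∧ pvF v a ≤ upper
    · rw [hy, if_pos hhit]
      have hd : (decide (lower ≤ pvF v a ∧ pvF v a ≤ upper)) = true := by simp [hhit]
      rw [hd]
      simp only [Option.map_some]
      congr 1
      omega
    · rw [hy, if_neg hhit]
      have hd : (decide (lower ≤ pvF v a ∧ pvF v a ≤ upper)) = false := by
        simpa using hhit
      rw [hd]
      have h3 : v - (a - 1) - 1 = v - (a + 1 - 1) := by omega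
      have h4 : pvF v a = pvF v (a + 1 - 1) := by norm_num
      rw [h3, h4]
      exact ih (a + 1) (by omega) (by omega)

theorem pvWhileA_scan (lower upper v : Int) (hv : 0 ≤ v) :
    pvWhileA lower upper 0 v =
      Option.map (fun k => v - k)
        ((PySem.List.pyRange 1 (v + 1) 1).find?
          (fun k => decide (lower ≤ pvF v k ∧ pvF v k ≤ upper))) := by
  have h := pvWhileA_scan_aux lower upper v v.toNat 1 (by omega) (by omega)
  have h1 : (1 : Int) - 1 = 0 := by omega
  rw [h1, pvF_zero] at h
  have h2 : v - 0 = v := by omega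
  rwa [h2] at h

-- the bisection returns the least step at or past the lower bound
theorem pvBisect_spec_aux (lower v : Int) :
    ∀ (n : Nat) (lo hi : Int), (hi - lo).toNat = n → 1 ≤ lo → lo ≤ hi → hi ≤ v →
    lower ≤ pvF v hi → (∀ k, 1 ≤ k → k < lo → ¬ lower ≤ pvF v k) →
    1 ≤ pvBisect lower v lo hi ∧ pvBisect lower v lo hi ≤ v ∧
      lower ≤ pvF v (pvBisect lower v lo hi) ∧
      (∀ k, 1 ≤ k → k < pvBisect lower v lo hi → ¬ lower ≤ pvF v k) := by
  intro n
  induction n using Nat.strong_induction_on with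
  | _ n IH =>
    intro lo hi hn h1 h2 h3 hP hpre
    by_cases h : lo < hi
    · have hmb := PySem.Int.floordiv_two_mid_bounds (le_of_lt h)
      have hmlt : PySem.Int.floordiv (lo + hi) 2 < hi :=
        (PySem.Int.floordiv_lt_iff_lt_mul (a := lo + hi) (b := 2) (q := hi) (by omega)).mpr (by omega)
      rw [pvBisect, dif_pos h]
      simp only []
      by_cases hm : lower ≤ pvF v (PySem.Int.floordiv (lo + hi) 2)
      · rw [if_pos hm]
        exact IH (PySem.Int.floordiv (lo + hi) 2 - lo).toNat (by omega) lo _ rfl h1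
          (by omega) (by omega) hm hpre
      · rw [if_neg hm]
        refine IH (hi - (PySem.Int.floordiv (lo + hi) 2 + 1)).toNat (by omega) _ hi rfl
          (by omega) (by omega) h3 hP ?_
        intro k hk1 hk2
        by_cases hkl : k < lo
        · exact hpre k hk1 hkl
        · intro hPk
          exact hm (le_trans hPk (pvF_mono v k _ (by omega) (by omega)))
    · rw [pvBisect, dif_neg h]
      have hlh : lo = hi := by omega
      exact ⟨h1, by omega, by rw [hlh]; exact hP, fun k hk1 hk2 => hpre k hk1 hk2⟩

-- per-velocity agreement of the two loop bodies
theorem pv_body_eq (lower upper v : Int) (s : PySem.Set Int) (hv : 1 ≤ v) :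
    (match pvWhileA lower upper 0 v with
     | some w => PySem.Set.add s w
     | none => s)
    = (if PySem.Int.floordiv (v * (v + 1)) 2 < lower then s
       else
         let lo := pvBisect lower v 1 v
         if pvF v lo ≤ upper then PySem.Set.add s (v - lo) else s) := by
  rw [pvWhileA_scan lower upper v (by omega), ← pvF_last]
  by_cases hg : pvF v v < lower
  · rw [if_pos hg]
    have hnone : (PySem.List.pyRange 1 (v + 1) 1).find?
        (fun k => decide (lower ≤ pvF v k ∧ pvF v k ≤ upper)) = none := by
      rw [List.find?_eq_none]
      intro k hk
      rw [PySem.List.mem_pyRange_one] at hk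
      have := pvF_mono v k v (by omega) (by omega)
      simp only [decide_eq_true_eq]
      omega
    rw [hnone]
    rfl
  · rw [if_neg hg]
    have hPv : lower ≤ pvF v v := by omega
    obtain ⟨hr1, hr2, hr3, hr4⟩ := pvBisect_spec_aux lower v (v - 1).toNat 1 v (by omega)
      (by omega) (by omega) (by omega) hPv (by omega)
    simp only []
    by_cases hru : pvF v (pvBisect lower v 1 v) ≤ upper
    · rw [if_pos hru]
      have hsplit : PySem.List.pyRange 1 (v + 1) 1 =
          PySem.List.pyRange 1 (pvBisect lower v 1 v) 1 ++
          PySem.List.pyRange (pvBisect lower v 1 v) (v + 1) 1 :=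
        PySem.List.pyRange_one_append 1 _ (v + 1) (by omega) (by omega)
      rw [hsplit, List.find?_append]
      have hfirst : (PySem.List.pyRange 1 (pvBisect lower v 1 v) 1).find?
          (fun k => decide (lower ≤ pvF v k ∧ pvF v k ≤ upper)) = none := by
        rw [List.find?_eq_none]
        intro k hk
        rw [PySem.List.mem_pyRange_one] at hk
        have := hr4 k (by omega) (by omega)
        simp only [decide_eq_true_eq]
        tauto
      rw [hfirst, PySem.List.pyRange_one_cons (by omega), List.find?_cons]
      have hd : (decide (lower ≤ pvF v (pvBisect lower v 1 v) ∧
          pvF v (pvBisect lower v 1 v) ≤ upper)) = true := by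
        simp [hr3, hru]
      rw [hd]
      rfl
    · rw [if_neg hru]
      have hnone : (PySem.List.pyRange 1 (v + 1) 1).find?
          (fun k => decide (lower ≤ pvF v k ∧ pvF v k ≤ upper)) = none := by
        rw [List.find?_eq_none]
        intro k hk
        rw [PySem.List.mem_pyRange_one] at hk
        simp only [decide_eq_true_eq]
        intro hc
        by_cases hkr : k < pvBisect lower v 1 v
        · exact hr4 k (by omega) hkr hc.1
        · have := pvF_mono v (pvBisect lower v 1 v) k (by omega) (by omega)
          omega
      rw [hnone]
      rfl

-- ===== VERDICT (by name: the statement is the Claim_ definition above) =====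
theorem find_valid_y_vels_spec : Claim_equal_find_valid_y_vels := by
  intro lower upper _hdom
  unfold Spec_find_valid_y_vels find_valid_y_vels find_valid_y_vels_alt
  by_cases hu : upper + 1 ≤ -1
  · rw [PySem.List.pyRange_neg_one_eq_nil (by omega), PySem.List.pyRange_neg_one_eq_nil (by omega)]
    rfl
  · have hA : PySem.List.pyRange (upper + 1) (-1) (-1) =
        PySem.List.pyRange (upper + 1) 0 (-1) ++ [0] := by
      rw [PySem.List.pyRange_neg_one_eq_reverse, PySem.List.pyRange_neg_one_eq_reverse]
      have h01 : (-1 : Int) + 1 = 0 := by norm_num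
      have h00 : (0 : Int) + 1 = 1 := by norm_num
      rw [h01, h00]
      rw [PySem.List.pyRange_one_append 0 1 (upper + 1 + 1) (by omega) (by omega)]
      have hs : PySem.List.pyRange 0 1 = [(0 : Int)] := by
        have := PySem.List.pyRange_one_singleton (0 : Int)
        norm_num at this
        exact this
      rw [hs, List.reverse_append]
      simp
    rw [hA, List.foldl_append]
    have hzero : ∀ (X : PySem.Set Int),
        List.foldl (fun s initial_y_vel =>
          match pvWhileA lower upper 0 initial_y_vel with
          | some w => PySem.Set.add s w
          | none => s) X [0] = X := by
      intro X
      simp only [List.foldl_cons, List.foldl_nil]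
      rw [pvWhileA]
      norm_num
    rw [hzero]
    exact PySem.List.foldl_congr_mem _ _ _ _
      (fun acc x hx => by
        rw [PySem.List.mem_pyRange_neg_one] at hx
        exact pv_body_eq lower upper x acc (by omega))
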